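-- pv_equiv track=rewrite | github.com/galid1/Algorithm | python/3.exams/21.03.20/stage_test/1-1.py | verify_flags
-- ===== SOURCE A (Python) =====
-- def verify_flags(flag_rules, input_flags):
--     used_flag = {}
--     turn = "FLAG"
--     cur_flag_type = None
--
--     for i in range(len(input_flags)):
--         element = input_flags[i]
--
--         # flag_name
--         if element.startswith('-'):
--             # Value가 나와야 할 차례
--             if turn == "VALUE":
--                 return False
--
--             # 이미 사용된 flag
--             if element in used_flag.keys():
--                 return False
--
--             # 존재하지 않는 flag
--             if element not in flag_rules.keys():
--                 return False
--             else:
--                 cur_flag_type = flag_rules[element]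
--                 used_flag[element] = True
--                 turn = "VALUE"
--
--         # flag_type
--         else:
--             # FLAG가 나와야 할 차례
--             if turn == "FLAG":
--                 return False
--
--             if cur_flag_type == None:
--                 turn = "FLAG"
--                 continue
--             # int 면 digit
--             elif cur_flag_type == "STRING":
--                 if element.isdigit():
--                     return False
--             elif cur_flag_type == "STRINGS":
--                 if element.isdigit():
--                     return False
--                 turn = "NO_MATTER"
--                 continue
--
--             elif cur_flag_type == "NUMBER":
--                 if not element.isdigit():
--                     return False
--             elif cur_flag_type == "NUMBERS":
--                 if not element.isdigit():
--                     return False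
--                 turn = "NO_MATTER"
--                 continue
--
--             turn = "FLAG"
--
--     return True
--
-- flag_rules = ["-days NUMBERS", "-dest STRING"]
-- ===== SOURCE B (Python) =====
-- def verify_flags(flag_rules, input_flags):
--     used = set()
--     i = 0
--     n = len(input_flags)
--     while i < n:
--         tok = input_flags[i]
--         if not tok.startswith('-'):
--             return False
--         if tok in used:
--             return False
--         if tok not in flag_rules:
--             return False
--         used.add(tok)
--         ftype = flag_rules[tok]
--         i += 1
--         if i == n:
--             return True          # trailing flag with no value is accepted
--         val = input_flags[i]
--         if val.startswith('-'):
--             return False         # a flag where a value is required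
--         if ftype in ("STRING", "STRINGS"):
--             if val.isdigit():
--                 return False
--         elif ftype in ("NUMBER", "NUMBERS"):
--             if not val.isdigit():
--                 return False
--         i += 1
--         if ftype in ("STRINGS", "NUMBERS"):
--             while i < n and not input_flags[i].startswith('-'):
--                 v = input_flags[i]
--                 if ftype == "STRINGS" and v.isdigit():
--                     return False
--                 if ftype == "NUMBERS" and not v.isdigit():
--                     return False
--                 i += 1
--     return True
-- ===== Notes on version B (the rewrite author's own statement) =====
-- stated objective: alternative
-- what changed: Replaces A's one-token-at-a-time state machine (turn/cur_flag_type flags threaded through a single loop) by an index-driven outer loop over flags with an inner greedy loop that consumes the value tokens of list-typed flags, tracking used flags in a set.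
import Mathlib
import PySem

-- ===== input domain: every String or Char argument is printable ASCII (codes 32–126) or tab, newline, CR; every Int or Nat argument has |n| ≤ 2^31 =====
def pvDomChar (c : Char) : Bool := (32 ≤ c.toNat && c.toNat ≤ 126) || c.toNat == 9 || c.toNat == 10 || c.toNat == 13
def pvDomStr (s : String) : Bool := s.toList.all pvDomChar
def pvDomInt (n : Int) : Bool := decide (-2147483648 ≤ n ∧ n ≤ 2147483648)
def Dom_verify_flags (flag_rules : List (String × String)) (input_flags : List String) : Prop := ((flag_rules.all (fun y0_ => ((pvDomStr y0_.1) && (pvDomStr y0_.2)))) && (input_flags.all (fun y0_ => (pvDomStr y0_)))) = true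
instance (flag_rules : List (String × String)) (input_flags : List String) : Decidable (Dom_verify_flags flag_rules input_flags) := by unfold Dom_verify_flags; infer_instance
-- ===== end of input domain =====

-- B replaces A's token-by-token state machine by an outer loop over flags with an
-- inner greedy value-consuming loop (same cost; objective: alternative decomposition).

-- ===== PORT A =====
-- A's for-loop over input_flags with state (used_flag, turn, cur_flag_type).
def vfLoopA (fr : PySem.Dict String String) (used : PySem.Dict String Bool)
    (turn : String) (cur : Option String) : List String → Bool
  | [] => true
  | element :: rest =>
    if PySem.Str.startswith element "-" then
      if turn == "VALUE" then false
      else if PySem.Dict.contains used element then false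
      else if !(PySem.Dict.contains fr element) then false
      else vfLoopA fr (PySem.Dict.insert used element true) "VALUE" (PySem.Dict.get? fr element) rest
    else
      if turn == "FLAG" then false
      else
        match cur with
        | none => vfLoopA fr used "FLAG" cur rest
        | some t =>
          if t == "STRING" then
            if PySem.Str.strIsdigit element then false else vfLoopA fr used "FLAG" cur rest
          else if t == "STRINGS" then
            if PySem.Str.strIsdigit element then false else vfLoopA fr used "NO_MATTER" cur rest
          else if t == "NUMBER" then
            if !(PySem.Str.strIsdigit element) then false else vfLoopA fr used "FLAG" cur rest
          else if t == "NUMBERS" then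
            if !(PySem.Str.strIsdigit element) then false else vfLoopA fr used "NO_MATTER" cur rest
          else vfLoopA fr used "FLAG" cur rest

def verify_flags (flag_rules : List (String × String)) (input_flags : List String) : Bool :=
  vfLoopA (PySem.Dict.mk flag_rules) PySem.Dict.empty "FLAG" none input_flags

-- ===== PORT B =====
-- inner while-loop of Source B: greedily consume validated value tokens of a
-- STRINGS/NUMBERS flag; none = return False, some r = remaining tokens.
def vfGreedy (ftype : String) : List String → Option (List String)
  | [] => some []
  | v :: rest =>
    if PySem.Str.startswith v "-" then some (v :: rest)
    else if ftype == "STRINGS" && PySem.Str.strIsdigit v then none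
    else if ftype == "NUMBERS" && !(PySem.Str.strIsdigit v) then none
    else vfGreedy ftype rest

-- termination helper cited by vfMain's decreasing_by
lemma vfGreedy_length : ∀ (ft : String) (l r : List String),
    vfGreedy ft l = some r → r.length ≤ l.length := by
  intro ft l
  induction l with
  | nil => intro r h; simp [vfGreedy] at h; simp [← h]
  | cons v rest ih =>
    intro r h
    simp only [vfGreedy] at h
    split_ifs at h with h1 h2 h3
    · cases h; simp
    · exact le_trans (ih r h) (by simp)

-- outer while-loop of Source B: one flag plus its value(s) per iteration.
def vfMain (fr : PySem.Dict String String) (used : PySem.Set String) : List String → Bool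
  | [] => true
  | tok :: rest =>
    if !(PySem.Str.startswith tok "-") then false
    else if PySem.Set.contains used tok then false
    else
      match PySem.Dict.get? fr tok with
      | none => false
      | some ftype =>
        match rest with
        | [] => true
        | val :: rest2 =>
          if PySem.Str.startswith val "-" then false
          else if (ftype == "STRING" || ftype == "STRINGS") && PySem.Str.strIsdigit val then false
          else if (ftype == "NUMBER" || ftype == "NUMBERS") && !(PySem.Str.strIsdigit val) then false
          else if ftype == "STRINGS" || ftype == "NUMBERS" then
            match hg : vfGreedy ftype rest2 with
            | none => false
            | some rest3 => vfMain fr (PySem.Set.add used tok) rest3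
          else vfMain fr (PySem.Set.add used tok) rest2
termination_by l => l.length
decreasing_by
  · have := vfGreedy_length ftype rest2 rest3 hg; simp; omega
  · simp

def verify_flags_alt (flag_rules : List (String × String)) (input_flags : List String) : Bool :=
  vfMain (PySem.Dict.mk flag_rules) PySem.Set.empty input_flags

-- ===== PRECONDITION & SPEC =====
def Spec_verify_flags (flag_rules : List (String × String)) (input_flags : List String) (out : Bool) : Prop := out = verify_flags_alt flag_rules input_flags
instance (flag_rules : List (String × String)) (input_flags : List String) (out : Bool) : Decidable (Spec_verify_flags flag_rules input_flags out) := by unfold Spec_verify_flags; infer_instance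

-- ===== CLAIM (what is proved, stated in full; the proofs are below) =====
def Claim_equal_verify_flags : Prop := ∀ (flag_rules : List (String × String)) (input_flags : List String), Dom_verify_flags flag_rules input_flags → Spec_verify_flags flag_rules input_flags (verify_flags flag_rules input_flags)

-- ===== LEMMAS AND PROOFS =====

-- main invariant: from turn="FLAG" A's loop equals B's outer loop (any cur), and from
-- turn="NO_MATTER" with a STRINGS/NUMBERS cur it equals B's greedy loop followed by the outer loop.
lemma vf_key (fr : PySem.Dict String String) :
    ∀ (n : Nat) (l : List String), l.length ≤ n →
    ∀ (used : PySem.Dict String Bool) (usedS : PySem.Set String),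
      (∀ x, (PySem.Dict.contains used x = true ↔ x ∈ usedS)) →
      (∀ cur, vfLoopA fr used "FLAG" cur l = vfMain fr usedS l) ∧
      (∀ ft, (ft = "STRINGS" ∨ ft = "NUMBERS") →
        vfLoopA fr used "NO_MATTER" (some ft) l =
          (match vfGreedy ft l with
           | none => false
           | some r => vfMain fr usedS r)) := by
  intro n
  induction n with
  | zero =>
    intro l hl used usedS hrel
    have hnil : l = [] := by cases l <;> simp_all
    subst hnil
    exact ⟨fun cur => by simp [vfLoopA, vfMain], fun ft _ => by simp [vfLoopA, vfMain, vfGreedy]⟩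
  | succ n ih =>
    intro l hl used usedS hrel
    cases l with
    | nil =>
      exact ⟨fun cur => by simp [vfLoopA, vfMain], fun ft _ => by simp [vfLoopA, vfMain, vfGreedy]⟩
    | cons tok rest =>
      have hlen : rest.length ≤ n := by simp at hl; omega
      have part1 : ∀ cur, vfLoopA fr used "FLAG" cur (tok :: rest) = vfMain fr usedS (tok :: rest) := by
        intro cur
        by_cases hs : PySem.Chars.startswith tok.toList ['-'] = true
        · by_cases hu : PySem.Dict.contains used tok = true
          · have hus : tok ∈ usedS := (hrel tok).mp hu
            simp [vfLoopA, vfMain, hs, hu, hus]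
          · have hus : tok ∉ usedS := fun h => hu ((hrel tok).mpr h)
            have hub : PySem.Dict.contains used tok = false := by simpa using hu
            have hrel' : ∀ x, (PySem.Dict.contains (PySem.Dict.insert used tok true) x = true ↔ x ∈ PySem.Set.add usedS tok) := by
              intro x
              rw [PySem.Dict.contains_insert, PySem.Set.mem_add]
              simp only [Bool.or_eq_true, beq_iff_eq]
              rw [hrel x]
              tauto
            rw [PySem.Set.add_of_not_mem hus] at hrel'
            cases hg : PySem.Dict.get? fr tok with
            | none =>
              have hc : PySem.Dict.contains fr tok = false := by
                rw [PySem.Dict.contains_eq_isSome_get?, hg]; rfl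
              simp [vfLoopA, vfMain, hs, hub, hus, hg, hc]
            | some ftype =>
              have hc : PySem.Dict.contains fr tok = true := by
                rw [PySem.Dict.contains_eq_isSome_get?, hg]; rfl
              cases rest with
              | nil => simp [vfLoopA, vfMain, hs, hub, hus, hg, hc]
              | cons val rest2 =>
                have hlen2 : rest2.length ≤ n := by simp at hl; omega
                by_cases hv : PySem.Chars.startswith val.toList ['-'] = true
                · simp [vfLoopA, vfMain, hs, hub, hus, hg, hc, hv]
                · have hvf : PySem.Chars.startswith val.toList ['-'] = false := by simpa using hv
                  by_cases e1 : ftype = "STRING"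
                  · subst e1
                    by_cases hd : PySem.Chars.strIsdigit val.toList = true
                    · simp [vfLoopA, vfMain, hs, hub, hus, hg, hc, hvf, hd]
                    · have hdf : PySem.Chars.strIsdigit val.toList = false := by simpa using hd
                      simp [vfLoopA, vfMain, hs, hub, hus, hg, hc, hvf, hdf]
                      exact (ih rest2 hlen2 _ _ hrel').1 _
                  · by_cases e2 : ftype = "STRINGS"
                    · subst e2
                      by_cases hd : PySem.Chars.strIsdigit val.toList = true
                      · simp [vfLoopA, vfMain, hs, hub, hus, hg, hc, hvf, hd]
                      · have hdf : PySem.Chars.strIsdigit val.toList = false := by simpa using hd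
                        have hrec := (ih rest2 hlen2 _ _ hrel').2 "STRINGS" (Or.inl rfl)
                        simp [vfLoopA, vfMain, hs, hub, hus, hg, hc, hvf, hdf, hrec]
                        cases vfGreedy "STRINGS" rest2 <;> simp
                    · by_cases e3 : ftype = "NUMBER"
                      · subst e3
                        by_cases hd : PySem.Chars.strIsdigit val.toList = true
                        · simp [vfLoopA, vfMain, hs, hub, hus, hg, hc, hvf, hd]
                          exact (ih rest2 hlen2 _ _ hrel').1 _
                        · have hdf : PySem.Chars.strIsdigit val.toList = false := by simpa using hd
                          simp [vfLoopA, vfMain, hs, hub, hus, hg, hc, hvf, hdf]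
                      · by_cases e4 : ftype = "NUMBERS"
                        · subst e4
                          by_cases hd : PySem.Chars.strIsdigit val.toList = true
                          · have hrec := (ih rest2 hlen2 _ _ hrel').2 "NUMBERS" (Or.inr rfl)
                            simp [vfLoopA, vfMain, hs, hub, hus, hg, hc, hvf, hd, hrec]
                            cases vfGreedy "NUMBERS" rest2 <;> simp
                          · have hdf : PySem.Chars.strIsdigit val.toList = false := by simpa using hd
                            simp [vfLoopA, vfMain, hs, hub, hus, hg, hc, hvf, hdf]
                        · simp [vfLoopA, vfMain, hs, hub, hus, hg, hc, hvf, e1, e2, e3, e4]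
                          exact (ih rest2 hlen2 _ _ hrel').1 _
        · have hsf : PySem.Chars.startswith tok.toList ['-'] = false := by simpa using hs
          simp [vfLoopA, vfMain, hsf]
      refine ⟨part1, ?_⟩
      intro ft hft
      by_cases hs : PySem.Chars.startswith tok.toList ['-'] = true
      · have hgr : vfGreedy ft (tok :: rest) = some (tok :: rest) := by simp [vfGreedy, hs]
        rw [hgr]
        show _ = vfMain fr usedS (tok :: rest)
        rw [← part1 (some ft)]
        simp [vfLoopA, hs]
      · have hsf : PySem.Chars.startswith tok.toList ['-'] = false := by simpa using hs
        rcases hft with hft | hft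
        · subst hft
          by_cases hd : PySem.Chars.strIsdigit tok.toList = true
          · simp [vfLoopA, vfGreedy, hsf, hd]
          · have hdf : PySem.Chars.strIsdigit tok.toList = false := by simpa using hd
            have hrec := (ih rest hlen _ _ hrel).2 "STRINGS" (Or.inl rfl)
            simp [vfLoopA, vfGreedy, hsf, hdf, hrec]
        · subst hft
          by_cases hd : PySem.Chars.strIsdigit tok.toList = true
          · have hrec := (ih rest hlen _ _ hrel).2 "NUMBERS" (Or.inr rfl)
            simp [vfLoopA, vfGreedy, hsf, hd, hrec]
          · have hdf : PySem.Chars.strIsdigit tok.toList = false := by simpa using hd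
            simp [vfLoopA, vfGreedy, hsf, hdf]

-- ===== VERDICT (by name: the statement is the Claim_ definition above) =====
theorem verify_flags_spec : Claim_equal_verify_flags := by
  intro fr l _
  unfold Spec_verify_flags verify_flags verify_flags_alt
  exact (vf_key (PySem.Dict.mk fr) l.length l le_rfl PySem.Dict.empty PySem.Set.empty
    (by intro x; simp [PySem.Dict.contains_empty, PySem.Set.empty])).1 none
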